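-- pv_equiv track=rewrite | github.com/lorenzialessandro/qd-nchl | plot_pyribs_optimizer.py | get_optimizer_paths
-- ===== SOURCE A (Python) =====
-- optimizers_names = ["MAPElites", "CMAME", "CMAMAE"]
--
-- def get_optimizer_paths(list_of_paths):
--     optimizer_paths = {name: [] for name in optimizers_names}
--     for path in list_of_paths:
--         for name in optimizers_names:
--             if name in path:
--                 optimizer_paths[name].append(path)
--                 break
--
--     return optimizer_paths
-- ===== SOURCE B (Python) =====
-- optimizers_names = ["MAPElites", "CMAME", "CMAMAE"]
--
-- def get_optimizer_paths(list_of_paths):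
--     # categories-outer: for each name, keep paths it matches that no earlier name matches
--     return {
--         name: [p for p in list_of_paths
--                if name in p and not any(prev in p for prev in optimizers_names[:i])]
--         for i, name in enumerate(optimizers_names)
--     }
-- ===== Notes on version B (the rewrite author's own statement) =====
-- stated objective: alternative
-- what changed: Flips the traversal: instead of a paths-outer loop with a per-path first-match break mutating a pre-seeded dict, B builds the dict in one comprehension iterating categories-outer, filtering paths that match the name and no earlier (higher-priority) name.
import Mathlib
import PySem

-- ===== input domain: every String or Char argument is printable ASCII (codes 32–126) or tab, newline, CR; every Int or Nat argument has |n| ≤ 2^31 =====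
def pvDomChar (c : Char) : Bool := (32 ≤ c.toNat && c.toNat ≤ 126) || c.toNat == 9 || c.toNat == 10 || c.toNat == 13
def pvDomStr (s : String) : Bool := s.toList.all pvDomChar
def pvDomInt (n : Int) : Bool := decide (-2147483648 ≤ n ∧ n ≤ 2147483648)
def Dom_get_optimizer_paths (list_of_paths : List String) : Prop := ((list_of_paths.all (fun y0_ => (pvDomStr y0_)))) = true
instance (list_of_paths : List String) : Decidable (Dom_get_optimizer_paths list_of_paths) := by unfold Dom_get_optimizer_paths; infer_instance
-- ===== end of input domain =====

-- B flips the traversal to categories-outer with explicit exclusion of earlier matches (objective: alternative decomposition, same results).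

-- ===== PORT A =====
def optimizers_names : List String := ["MAPElites", "CMAME", "CMAMAE"]

-- inner 'for name in optimizers_names: if name in path: append; break'
def pvALoop (path : String) : List String → PySem.Dict String (List String) → PySem.Dict String (List String)
  | [], d => d
  | n :: rest, d =>
      if PySem.Str.isIn n path then d.modify n [] (· ++ [path])
      else pvALoop path rest d

def get_optimizer_paths (list_of_paths : List String) : List (String × List String) :=
  let init := optimizers_names.foldl (fun d n => d.insert n ([] : List String)) PySem.Dict.empty
  (list_of_paths.foldl (fun d path => pvALoop path optimizers_names d) init).items

-- ===== PORT B =====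
def get_optimizer_paths_alt (list_of_paths : List String) : List (String × List String) :=
  (PySem.List.enumerate optimizers_names).map (fun p =>
    (p.2, list_of_paths.filter (fun q =>
      PySem.Str.isIn p.2 q &&
      !((PySem.List.slice optimizers_names none (some p.1)).any (fun prev => PySem.Str.isIn prev q)))))

-- ===== PRECONDITION & SPEC =====
def Spec_get_optimizer_paths (list_of_paths : List String) (out : List (String × List String)) : Prop := out = get_optimizer_paths_alt list_of_paths
instance (list_of_paths : List String) (out : List (String × List String)) : Decidable (Spec_get_optimizer_paths list_of_paths out) := by unfold Spec_get_optimizer_paths; infer_instance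

-- ===== CLAIM (what is proved, stated in full; the proofs are below) =====
def Claim_equal_get_optimizer_paths : Prop := ∀ (list_of_paths : List String), Dom_get_optimizer_paths list_of_paths → Spec_get_optimizer_paths list_of_paths (get_optimizer_paths list_of_paths)

-- ===== LEMMAS AND PROOFS =====

-- the three B-side predicates, spelled out
def pvF1 (q : String) : Bool := PySem.Str.isIn "MAPElites" q
def pvF2 (q : String) : Bool := PySem.Str.isIn "CMAME" q && !PySem.Str.isIn "MAPElites" q
def pvF3 (q : String) : Bool := PySem.Str.isIn "CMAMAE" q && !PySem.Str.isIn "MAPElites" q && !PySem.Str.isIn "CMAME" q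

lemma pvMain (lp : List String) (l1 l2 l3 : List String) :
    (lp.foldl (fun d path => pvALoop path optimizers_names d)
      (PySem.Dict.mk [("MAPElites", l1), ("CMAME", l2), ("CMAMAE", l3)])).items
    = [("MAPElites", l1 ++ lp.filter pvF1),
       ("CMAME", l2 ++ lp.filter pvF2),
       ("CMAMAE", l3 ++ lp.filter pvF3)] := by
  induction lp generalizing l1 l2 l3 with
  | nil => simp
  | cons p rest ih =>
      simp only [List.foldl_cons]
      by_cases h1 : PySem.Chars.isIn ['M','A','P','E','l','i','t','e','s'] p.toList
      · have : pvALoop p optimizers_names (PySem.Dict.mk [("MAPElites", l1), ("CMAME", l2), ("CMAMAE", l3)])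
            = PySem.Dict.mk [("MAPElites", l1 ++ [p]), ("CMAME", l2), ("CMAMAE", l3)] := by
          simp [pvALoop, optimizers_names, h1, PySem.Dict.modify, PySem.Dict.contains, PySem.Dict.insert, PySem.Dict.getD, PySem.Dict.get?]
        rw [this, ih]
        simp [pvF1, pvF2, pvF3, h1]
      · by_cases h2 : PySem.Chars.isIn ['C','M','A','M','E'] p.toList
        · have : pvALoop p optimizers_names (PySem.Dict.mk [("MAPElites", l1), ("CMAME", l2), ("CMAMAE", l3)])
              = PySem.Dict.mk [("MAPElites", l1), ("CMAME", l2 ++ [p]), ("CMAMAE", l3)] := by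
            simp [pvALoop, optimizers_names, h1, h2, PySem.Dict.modify, PySem.Dict.contains, PySem.Dict.insert, PySem.Dict.getD, PySem.Dict.get?]
          rw [this, ih]
          simp [pvF1, pvF2, pvF3, h1, h2]
        · by_cases h3 : PySem.Chars.isIn ['C','M','A','M','A','E'] p.toList
          · have : pvALoop p optimizers_names (PySem.Dict.mk [("MAPElites", l1), ("CMAME", l2), ("CMAMAE", l3)])
                = PySem.Dict.mk [("MAPElites", l1), ("CMAME", l2), ("CMAMAE", l3 ++ [p])] := by
              simp [pvALoop, optimizers_names, h1, h2, h3, PySem.Dict.modify, PySem.Dict.contains, PySem.Dict.insert, PySem.Dict.getD, PySem.Dict.get?]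
            rw [this, ih]
            simp [pvF1, pvF2, pvF3, h1, h2, h3]
          · have : pvALoop p optimizers_names (PySem.Dict.mk [("MAPElites", l1), ("CMAME", l2), ("CMAMAE", l3)])
                = PySem.Dict.mk [("MAPElites", l1), ("CMAME", l2), ("CMAMAE", l3)] := by
              simp [pvALoop, optimizers_names, h1, h2, h3]
            rw [this, ih]
            simp [pvF1, pvF2, pvF3, h1, h2, h3]

lemma pvAltEq (lp : List String) :
    get_optimizer_paths_alt lp
    = [("MAPElites", lp.filter pvF1), ("CMAME", lp.filter pvF2), ("CMAMAE", lp.filter pvF3)] := by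
  unfold get_optimizer_paths_alt optimizers_names pvF1 pvF2 pvF3
  simp [PySem.List.enumerate, PySem.List.slice, Bool.and_assoc]

-- ===== VERDICT (by name: the statement is the Claim_ definition above) =====
theorem get_optimizer_paths_spec : Claim_equal_get_optimizer_paths := by
  intro lp _
  show get_optimizer_paths lp = get_optimizer_paths_alt lp
  have hinit : (optimizers_names.foldl (fun d n => d.insert n ([] : List String)) PySem.Dict.empty)
      = PySem.Dict.mk [("MAPElites", []), ("CMAME", []), ("CMAMAE", [])] := by decide
  rw [get_optimizer_paths, hinit, pvMain, pvAltEq]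
  simp
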